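-- pv_equiv track=rewrite | github.com/yongsinfok/ocrAI | app.py | parse_table_from_text
-- ===== SOURCE A (Python) =====
-- def parse_table_from_text(text: str) -> list:
--     """Parse table data from text.
--
--     Args:
--         text: Text content
--
--     Returns:
--         List of lists representing table
--     """
--     lines = [line.strip() for line in text.split('\n') if line.strip()]
--
--     # Simple table detection - look for consistent separators
--     tables = []
--     current_table = []
--
--     for line in lines:
--         # Check for table-like structure (tabs, pipes, or multiple spaces)
--         if '\t' in line or '|' in line or '  ' in line:
--             cells = [cell.strip() for cell in line.replace('|', '\t').split('\t')]
--             cells = [c for c in cells if c]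
--             if cells:
--                 current_table.append(cells)
--         else:
--             if current_table:
--                 tables.append(current_table)
--                 current_table = []
--
--     if current_table:
--         tables.append(current_table)
--
--     if tables:
--         return tables[0]
--
--     # No table found, return text as simple list
--     return [[line] for line in lines]
-- ===== SOURCE B (Python) =====
-- def parse_table_from_text(text: str) -> list:
--     """Parse table data from text (early-return scan over runs of table-like lines)."""
--     lines = [line.strip() for line in text.split('\n') if line.strip()]
--
--     def is_table_like(line):
--         return '\t' in line or '|' in line or '  ' in line
--
--     i, n = 0, len(lines)
--     while i < n:
--         if is_table_like(lines[i]):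
--             rows = []
--             while i < n and is_table_like(lines[i]):
--                 cells = [c for c in (cell.strip() for cell in lines[i].replace('|', '\t').split('\t')) if c]
--                 if cells:
--                     rows.append(cells)
--                 i += 1
--             if rows:
--                 return rows
--         else:
--             i += 1
--     return [[line] for line in lines]
-- ===== Notes on version B (the rewrite author's own statement) =====
-- stated objective: alternative
-- what changed: A accumulates a list of all tables via a flush-on-delimiter state machine and then returns tables[0]; B scans runs of consecutive table-like lines with a nested loop and returns the first run with nonempty rows immediately, never building the list of tables.
import Mathlib
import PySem

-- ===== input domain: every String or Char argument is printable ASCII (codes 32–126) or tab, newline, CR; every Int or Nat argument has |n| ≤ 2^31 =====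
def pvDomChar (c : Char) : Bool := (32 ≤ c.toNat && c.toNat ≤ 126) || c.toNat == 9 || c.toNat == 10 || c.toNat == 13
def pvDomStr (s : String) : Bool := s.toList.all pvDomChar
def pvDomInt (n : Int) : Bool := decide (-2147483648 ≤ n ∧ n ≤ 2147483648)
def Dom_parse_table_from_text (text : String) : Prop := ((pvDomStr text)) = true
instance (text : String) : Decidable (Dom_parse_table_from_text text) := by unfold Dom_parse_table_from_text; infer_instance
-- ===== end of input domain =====

-- B re-decomposes A's flush-accumulator loop as an early-returning nested scan over runs of
-- table-like lines (objective: alternative decomposition, same cost).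

-- shared helpers: sub-expressions both Pythons contain verbatim
-- lines = [line.strip() for line in text.split('\n') if line.strip()]
def pyLines (text : String) : List String :=
  (((PySem.Str.split? text "\n").getD []).filter
      (fun l => PySem.Str.strip l ≠ "")).map PySem.Str.strip

-- '\t' in line or '|' in line or '  ' in line
def isTableLike (l : String) : Bool :=
  PySem.Str.isIn "\t" l || PySem.Str.isIn "|" l || PySem.Str.isIn "  " l

-- [c for c in (cell.strip() for cell in line.replace('|','\t').split('\t')) if c]
def parseCells (l : String) : List String :=
  (((PySem.Str.split? (PySem.Str.replace l "|" "\t") "\t").getD []).map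
      PySem.Str.strip).filter (fun c => c ≠ "")

-- ===== PORT A =====
-- A's for-loop over lines with state (tables, current_table)
def aLoop : List String → List (List (List String)) → List (List String) →
    List (List (List String)) × List (List String)
  | [], tables, current => (tables, current)
  | l :: rest, tables, current =>
    if isTableLike l then
      let cells := parseCells l
      if cells ≠ [] then aLoop rest tables (current ++ [cells])
      else aLoop rest tables current
    else
      if current ≠ [] then aLoop rest (tables ++ [current]) []
      else aLoop rest tables current

def parse_table_from_text (text : String) : List (List String) :=
  let lines := pyLines text
  let p := aLoop lines [] []
  let tables := if p.2 ≠ [] then p.1 ++ [p.2] else p.1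
  match tables with
  | t :: _ => t
  | [] => lines.map (fun l => [l])

-- ===== PORT B =====
-- B's inner while-loop: collect the rows of the run of table-like lines at the head,
-- also returning the remaining lines
def collectRun : List String → List (List String) × List String
  | [] => ([], [])
  | l :: rest =>
    if isTableLike l then
      let res := collectRun rest
      let cells := parseCells l
      (if cells ≠ [] then cells :: res.1 else res.1, res.2)
    else ([], l :: rest)

-- needed by altScan's termination proof
theorem collectRun_snd_length : ∀ ls : List String, (collectRun ls).2.length ≤ ls.length
  | [] => by simp [collectRun]
  | l :: rest => by
    by_cases h : isTableLike l = true <;>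
      simp [collectRun, h] <;>
      exact Nat.le_succ_of_le (collectRun_snd_length rest)

-- B's outer while-loop: scan for the first run with nonempty rows
def altScan : List String → Option (List (List String))
  | [] => none
  | l :: rest =>
    if h : isTableLike l = true then
      let res := collectRun (l :: rest)
      if res.1 ≠ [] then some res.1 else altScan res.2
    else altScan rest
termination_by ls => ls.length
decreasing_by
  · have e : (collectRun (l :: rest)).2 = (collectRun rest).2 := by simp [collectRun, h]
    simp only [e]
    exact Nat.lt_succ_of_le (collectRun_snd_length rest)
  · simp

def parse_table_from_text_alt (text : String) : List (List String) :=
  let lines := pyLines text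
  match altScan lines with
  | some rows => rows
  | none => lines.map (fun l => [l])

-- ===== PRECONDITION & SPEC =====
def Spec_parse_table_from_text (text : String) (out : List (List String)) : Prop := out = parse_table_from_text_alt text
instance (text : String) (out : List (List String)) : Decidable (Spec_parse_table_from_text text out) := by unfold Spec_parse_table_from_text; infer_instance

-- ===== CLAIM (what is proved, stated in full; the proofs are below) =====
def Claim_equal_parse_table_from_text : Prop := ∀ (text : String), Dom_parse_table_from_text text → Spec_parse_table_from_text text (parse_table_from_text text)

-- ===== LEMMAS AND PROOFS =====

-- the tables accumulator of A's loop is only ever appended to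
theorem aLoop_prefix : ∀ (ls : List String) (tables : List (List (List String)))
    (cur : List (List String)),
    aLoop ls tables cur = (tables ++ (aLoop ls [] cur).1, (aLoop ls [] cur).2) := by
  intro ls
  induction ls with
  | nil => intro tables cur; simp [aLoop]
  | cons l rest ih =>
    intro tables cur
    by_cases h : isTableLike l = true
    · by_cases hc : parseCells l = []
      · have e : ∀ t, aLoop (l :: rest) t cur = aLoop rest t cur := fun t => by
          simp [aLoop, h, hc]
        rw [e tables, e []]; exact ih tables cur
      · have e : ∀ t, aLoop (l :: rest) t cur = aLoop rest t (cur ++ [parseCells l]) :=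
          fun t => by simp [aLoop, h, hc]
        rw [e tables, e []]; exact ih tables _
    · by_cases hc : cur = []
      · have e : ∀ t, aLoop (l :: rest) t cur = aLoop rest t cur := fun t => by
          simp [aLoop, h, hc]
        rw [e tables, e []]; exact ih tables cur
      · have e : ∀ t, aLoop (l :: rest) t cur = aLoop rest (t ++ [cur]) [] := fun t => by
          simp [aLoop, h, hc]
        rw [e tables, e []]
        rw [ih (tables ++ [cur]) [], ih ([] ++ [cur]) []]
        simp

-- A's loop decomposed at the first run boundary, in terms of B's collectRun
theorem aLoop_run : ∀ (ls : List String) (cur : List (List String)),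
    aLoop ls [] cur =
      match (collectRun ls).2 with
      | [] => ([], cur ++ (collectRun ls).1)
      | _ :: rest'' =>
        if cur ++ (collectRun ls).1 ≠ [] then aLoop rest'' [cur ++ (collectRun ls).1] []
        else aLoop rest'' [] [] := by
  intro ls
  induction ls with
  | nil => intro cur; simp [aLoop, collectRun]
  | cons l rest ih =>
    intro cur
    by_cases h : isTableLike l = true
    · by_cases hc : parseCells l = []
      · have e : aLoop (l :: rest) [] cur = aLoop rest [] cur := by simp [aLoop, h, hc]
        have e1 : (collectRun (l :: rest)).1 = (collectRun rest).1 := by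
          simp [collectRun, h, hc]
        have e2 : (collectRun (l :: rest)).2 = (collectRun rest).2 := by
          simp [collectRun, h]
        rw [e, e1, e2]; exact ih cur
      · have e : aLoop (l :: rest) [] cur = aLoop rest [] (cur ++ [parseCells l]) := by
          simp [aLoop, h, hc]
        have e1 : (collectRun (l :: rest)).1 = parseCells l :: (collectRun rest).1 := by
          simp [collectRun, h, hc]
        have e2 : (collectRun (l :: rest)).2 = (collectRun rest).2 := by
          simp [collectRun, h]
        rw [e, ih (cur ++ [parseCells l]), e1, e2]
        rcases (collectRun rest).2 with _ | ⟨d, r⟩ <;> simp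
    · rcases eq_or_ne cur [] with hc | hc
      · subst hc; simp [aLoop, collectRun, h]
      · simp [aLoop, collectRun, h, hc]

-- the line after the run returned by collectRun is never table-like
theorem collectRun_snd_head_not_table : ∀ (xs : List String) (d : String) (r : List String),
    (collectRun xs).2 = d :: r → isTableLike d = false := by
  intro xs
  induction xs with
  | nil => intro d r hx; simp [collectRun] at hx
  | cons x xrest ihx =>
    intro d r hx
    by_cases hx2 : isTableLike x = true
    · rw [show (collectRun (x :: xrest)).2 = (collectRun xrest).2 from by
        simp [collectRun, hx2]] at hx
      exact ihx d r hx
    · rw [show (collectRun (x :: xrest)).2 = x :: xrest from by simp [collectRun, hx2]] at hx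
      injection hx with h1 _
      subst h1
      simpa using hx2

-- head of A's flushed tables list = B's scan (strong induction on length)
theorem main_head : ∀ (n : Nat) (ls : List String), ls.length ≤ n →
    (if (aLoop ls [] []).2 ≠ [] then (aLoop ls [] []).1 ++ [(aLoop ls [] []).2]
     else (aLoop ls [] []).1).head? = altScan ls := by
  intro n
  induction n with
  | zero =>
    intro ls hl
    have : ls = [] := List.eq_nil_of_length_eq_zero (Nat.le_zero.mp hl)
    subst this; simp [aLoop, altScan]
  | succ n ih =>
    intro ls hl
    match ls with
    | [] => simp [aLoop, altScan]
    | l :: rest =>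
      by_cases h : isTableLike l = true
      · rw [aLoop_run (l :: rest) []]
        have hsnd : (collectRun (l :: rest)).2 = (collectRun rest).2 := by
          simp [collectRun, h]
        rcases hr : (collectRun (l :: rest)).2 with _ | ⟨d, rest''⟩
        · -- the run reaches the end of the input
          simp only [hr, List.nil_append]
          by_cases hrows : (collectRun (l :: rest)).1 = [] <;>
            simp [altScan, h, hr, hrows]
        · simp only [hr, List.nil_append]
          by_cases hrows : (collectRun (l :: rest)).1 = []
          · -- empty run: both continue scanning after the delimiter
            simp only [hrows, ne_eq, not_true_eq_false, if_false]
            have hlen : rest''.length ≤ n := by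
              have h1 : (collectRun rest).2.length ≤ rest.length :=
                collectRun_snd_length rest
              have h2 : (d :: rest'').length = (collectRun rest).2.length := by
                rw [← hsnd, hr]
              simp only [List.length_cons] at h2
              simp only [List.length_cons] at hl
              omega
            rw [ih rest'' hlen]
            have e : altScan (l :: rest) = altScan (d :: rest'') := by
              rw [altScan]; simp [h, hrows, hr]
            rw [e, altScan]
            have hd : isTableLike d = false :=
              collectRun_snd_head_not_table (l :: rest) d rest'' hr
            simp [hd]
          · -- nonempty run: A flushes it as tables[0], B returns it
            simp only [ne_eq, hrows, not_false_eq_true, if_true]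
            rw [aLoop_prefix rest'' [(collectRun (l :: rest)).1] []]
            have e : altScan (l :: rest) = some (collectRun (l :: rest)).1 := by
              rw [altScan]; simp [h, hrows]
            rw [e]
            by_cases hfin : (aLoop rest'' [] []).2 ≠ [] <;> simp [hfin]
      · have h1 : aLoop (l :: rest) [] [] = aLoop rest [] [] := by simp [aLoop, h]
        have h2 : altScan (l :: rest) = altScan rest := by rw [altScan]; simp [h]
        rw [h1, h2]
        exact ih rest (by simpa using Nat.le_of_succ_le_succ (by simpa using hl))

-- ===== VERDICT (by name: the statement is the Claim_ definition above) =====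
theorem parse_table_from_text_spec : Claim_equal_parse_table_from_text := by
  intro text _
  show parse_table_from_text text = parse_table_from_text_alt text
  simp only [parse_table_from_text, parse_table_from_text_alt]
  have hm := main_head (pyLines text).length (pyLines text) (Nat.le_refl _)
  rcases hT : (if (aLoop (pyLines text) [] []).2 ≠ [] then
      (aLoop (pyLines text) [] []).1 ++ [(aLoop (pyLines text) [] []).2]
    else (aLoop (pyLines text) [] []).1) with _ | ⟨t, ts⟩ <;>
    rw [hT] at hm <;> rw [← hm] <;> simp
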